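-- pv_equiv track=rewrite | github.com/jorippppong/Daily_Challenge | Programmers/Lv.3/인사고과.py | solution
-- ===== SOURCE A (Python) =====
-- def solution(scores):
--     wanHo = scores[0]
--     scores.sort(key = lambda x : (-x[0], x[1]))
--     maxNum = scores[0][1]
--     rank = 1
--     for a, b in scores:
--         if b < maxNum:
--             if a == wanHo[0] and b == wanHo[1]:
--                 return -1
--         else:
--             if a+b > wanHo[0]+wanHo[1]:
--                 rank += 1
--         maxNum = max(maxNum, b)
--     return rank
-- ===== SOURCE B (Python) =====
-- def solution(scores):
--     # Direct dominance-scan re-implementation.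
--     # NOTE: unlike A, B does NOT mutate `scores` (A sorts it in place);
--     # the equivalence claimed is about the return value only.
--     a0, b0 = scores[0][0], scores[0][1]
--     if any(x[0] > a0 and x[1] > b0 for x in scores):
--         return -1
--     target = a0 + b0
--     rank = 1
--     for e in scores:
--         if e[0] + e[1] > target and not any(x[0] > e[0] and x[1] > e[1] for x in scores):
--             rank += 1
--     return rank
-- ===== Notes on version B (the rewrite author's own statement) =====
-- stated objective: alternative
-- what changed: A sorts by (-score, peer) and runs a single running-max sweep that both eliminates dominated employees and counts ranks with an early -1 return; B drops the sort entirely and uses a direct quadratic dominance scan (any strictly-better pair) plus a plain count, and unlike A it does not mutate the input list (return-value equivalence).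
import Mathlib
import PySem

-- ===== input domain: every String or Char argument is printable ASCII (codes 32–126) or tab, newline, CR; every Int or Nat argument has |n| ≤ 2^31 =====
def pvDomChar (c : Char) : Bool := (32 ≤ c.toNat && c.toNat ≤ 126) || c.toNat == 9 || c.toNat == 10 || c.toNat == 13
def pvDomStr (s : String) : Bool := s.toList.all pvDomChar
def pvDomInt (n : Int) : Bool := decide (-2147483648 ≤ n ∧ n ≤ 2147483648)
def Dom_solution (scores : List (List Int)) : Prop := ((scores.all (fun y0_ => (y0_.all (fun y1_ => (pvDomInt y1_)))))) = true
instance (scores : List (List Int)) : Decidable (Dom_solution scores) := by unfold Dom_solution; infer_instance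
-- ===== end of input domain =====

-- B replaces A's sort + running-max elimination sweep by a direct dominance scan and a plain
-- count (same return value; B does not mutate its argument, while A sorts it in place).


-- ===== PORT A =====
-- x[0] and x[1]: exact for the length-2 rows Pre_solution admits (shared by both ports)
def av (x : List Int) : Int := x.getD 0 0
def bv (x : List Int) : Int := x.getD 1 0

-- Python's sort key is the tuple (-x[0], x[1]), compared lexicographically: Lex (Int × Int)
def keyA (x : List Int) : Lex (Int × Int) := toLex (-(av x), bv x)

-- the 'for a, b in scores:' loop of A (the early 'return -1' becomes the -1 branch)
def loopA (wa wb : Int) : Int → Int → List (List Int) → Int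
  | _, rank, [] => rank
  | M, rank, x :: rest =>
    if bv x < M then
      if av x = wa ∧ bv x = wb then -1
      else loopA wa wb (max M (bv x)) rank rest
    else
      if av x + bv x > wa + wb then loopA wa wb (max M (bv x)) (rank + 1) rest
      else loopA wa wb (max M (bv x)) rank rest

def solution (scores : List (List Int)) : Int :=
  match scores with
  | [] => 0  -- scores[0]: IndexError, excluded by Pre_solution
  | wanHo :: _ =>
    match PySem.List.sorted scores keyA with
    | [] => 0  -- unreachable: sorted of a nonempty list is nonempty
    | s0 :: srest =>
      loopA (av wanHo) (bv wanHo) (bv s0) 1 (s0 :: srest)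

-- ===== PORT B =====
def dominatedBy (scores : List (List Int)) (a b : Int) : Bool :=
  scores.any (fun x => decide (a < av x) && decide (b < bv x))

def solution_alt (scores : List (List Int)) : Int :=
  match scores with
  | [] => 0  -- scores[0]: IndexError, excluded by Pre_solution
  | w :: _ =>
    let a0 := av w
    let b0 := bv w
    if dominatedBy scores a0 b0 then -1
    else
      scores.foldl (fun rank e =>
        if decide (av e + bv e > a0 + b0) && !dominatedBy scores (av e) (bv e)
        then rank + 1 else rank) 1

-- ===== PRECONDITION & SPEC =====
-- Pre_ excludes exactly the inputs on which Python A raises: the empty list (IndexError on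
-- scores[0]) and any row whose length is not 2 ('for a, b in scores' / x[1] fail there).
def Pre_solution (scores : List (List Int)) : Prop :=
  scores ≠ [] ∧ ∀ x ∈ scores, x.length = 2
instance (scores : List (List Int)) : Decidable (Pre_solution scores) := by unfold Pre_solution; infer_instance
def pvWitness_solution : List (List Int) := [[2, 2], [1, 4], [3, 2], [3, 2], [2, 1]]

def Spec_solution (scores : List (List Int)) (out : Int) : Prop := out = solution_alt scores
instance (scores : List (List Int)) (out : Int) : Decidable (Spec_solution scores out) := by unfold Spec_solution; infer_instance

-- ===== CLAIM (what is proved, stated in full; the proofs are below) =====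
def Claim_equal_solution : Prop := ∀ (scores : List (List Int)), Dom_solution scores → Pre_solution scores → Spec_solution scores (solution scores)

-- ===== LEMMAS AND PROOFS =====

-- the sort order of A, read off on the two columns
def relS (c r : List Int) : Prop :=
  av r < av c ∨ (av c = av r ∧ bv c ≤ bv r)

-- 'this employee is eliminated and carries wanHo's two scores'
def elimEq (scores : List (List Int)) (wa wb : Int) (x : List Int) : Bool :=
  dominatedBy scores (av x) (bv x) && (av x == wa) && (bv x == wb)

-- 'this employee outranks wanHo': not eliminated and larger total
def goodB (scores : List (List Int)) (wa wb : Int) (x : List Int) : Bool :=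
  decide (av x + bv x > wa + wb) && !dominatedBy scores (av x) (bv x)

lemma dom_iff (scores : List (List Int)) (a b : Int) :
    dominatedBy scores a b = true ↔ ∃ y ∈ scores, a < av y ∧ b < bv y := by
  simp [dominatedBy, List.any_eq_true]

lemma foldl_count (p : List Int → Bool) :
    ∀ (l : List (List Int)) (init : Int),
      l.foldl (fun r e => if p e = true then r + 1 else r) init = init + (l.countP p : Int)
  | [], init => by simp
  | x :: l, init => by
    simp only [List.foldl_cons, List.countP_cons, foldl_count p l]
    by_cases h : p x = true <;> simp [h] <;> omega

lemma loopA_eq (scores L : List (List Int)) (l0 : List Int) (wa wb : Int)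
    (hperm : L.Perm scores) (hpw : L.Pairwise relS) (hhead : L.head? = some l0) :
    ∀ (R C : List (List Int)) (M rank : Int),
      L = C ++ R →
      (∀ c ∈ C, bv c ≤ M) →
      (M = bv l0 ∨ ∃ c ∈ C, bv c = M) →
      (C = [] ∨ l0 ∈ C) →
      loopA wa wb M rank R =
        if R.any (elimEq scores wa wb) then -1
        else rank + (R.countP (goodB scores wa wb) : Int) := by
  intro R
  induction R with
  | nil => intro C M rank hL hub hatt hl0; simp [loopA]
  | cons x rest ih =>
    intro C M rank hL hub hatt hl0
    -- the running-max test is exactly the dominance test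
    have hbr : bv x < M ↔ dominatedBy scores (av x) (bv x) = true := by
      constructor
      · intro h
        have hcex : ∃ c ∈ C, bv x < bv c := by
          rcases hatt with hM | ⟨c, hc, hcM⟩
          · rcases hl0 with hC | hmem
            · exfalso
              subst hC
              simp only [List.nil_append] at hL
              rw [hL] at hhead
              simp only [List.head?_cons, Option.some.injEq] at hhead
              rw [hM, ← hhead] at h
              omega
            · exact ⟨l0, hmem, by omega⟩
          · exact ⟨c, hc, by omega⟩
        obtain ⟨c, hcC, hcb⟩ := hcex
        have hrel : relS c x :=
          (List.pairwise_append.mp (hL ▸ hpw)).2.2 c hcC x (by simp)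
        rcases hrel with h1 | ⟨h1, h2⟩
        · exact (dom_iff scores _ _).mpr
            ⟨c, hperm.subset (by rw [hL]; exact List.mem_append_left _ hcC), h1, hcb⟩
        · omega
      · intro h
        obtain ⟨y, hy, h1, h2⟩ := (dom_iff scores _ _).mp h
        have hyL : y ∈ L := hperm.mem_iff.mpr hy
        rw [hL] at hyL
        rcases List.mem_append.mp hyL with hyC | hyR
        · have := hub y hyC; omega
        · rcases List.mem_cons.mp hyR with rfl | hyrest
          · omega
          · have hrel : relS x y :=
              (List.pairwise_cons.mp (List.pairwise_append.mp (hL ▸ hpw)).2.1).1 y hyrest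
            rcases hrel with h3 | ⟨h3, _⟩ <;> omega
    -- the invariant survives one step
    have hL' : L = (C ++ [x]) ++ rest := by simpa using hL
    have hub' : ∀ c ∈ C ++ [x], bv c ≤ max M (bv x) := by
      intro c hc
      rcases List.mem_append.mp hc with hc | hc
      · exact le_trans (hub c hc) (le_max_left _ _)
      · simp only [List.mem_singleton] at hc; subst hc; exact le_max_right _ _
    have hatt' : max M (bv x) = bv l0 ∨ ∃ c ∈ C ++ [x], bv c = max M (bv x) := by
      rcases max_choice M (bv x) with hm | hm
      · rcases hatt with hM | ⟨c, hc, hcM⟩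
        · exact Or.inl (by omega)
        · exact Or.inr ⟨c, List.mem_append_left _ hc, by omega⟩
      · exact Or.inr ⟨x, List.mem_append_right _ (by simp), hm.symm⟩
    have hl0' : C ++ [x] = [] ∨ l0 ∈ C ++ [x] := by
      rcases hl0 with hC | hmem
      · subst hC
        simp only [List.nil_append] at hL
        rw [hL] at hhead
        simp only [List.head?_cons, Option.some.injEq] at hhead
        exact Or.inr (by simp [hhead])
      · exact Or.inr (List.mem_append_left _ hmem)
    by_cases hB : bv x < M
    · have hdom : dominatedBy scores (av x) (bv x) = true := hbr.mp hB
      have hgood : goodB scores wa wb x = false := by simp [goodB, hdom]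
      by_cases hEq : av x = wa ∧ bv x = wb
      · have helim : elimEq scores wa wb x = true := by
          simp only [elimEq, Bool.and_eq_true, beq_iff_eq]
          exact ⟨⟨hdom, hEq.1⟩, hEq.2⟩
        simp only [loopA]
        rw [if_pos hB, if_pos hEq, List.any_cons, helim]
        simp
      · have helim : elimEq scores wa wb x = false := by
          rw [Bool.eq_false_iff]
          intro hcon
          simp only [elimEq, Bool.and_eq_true, beq_iff_eq] at hcon
          exact hEq ⟨hcon.1.2, hcon.2⟩
        rw [show loopA wa wb M rank (x :: rest)
              = loopA wa wb (max M (bv x)) rank rest by simp [loopA, hB, hEq]]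
        rw [ih (C ++ [x]) (max M (bv x)) rank hL' hub' hatt' hl0']
        simp [List.any_cons, helim, hgood]
    · have hdom : dominatedBy scores (av x) (bv x) = false :=
        Bool.eq_false_iff.mpr (fun hcon => hB (hbr.mpr hcon))
      have helim : elimEq scores wa wb x = false := by simp [elimEq, hdom]
      by_cases hS : av x + bv x > wa + wb
      · have hgood : goodB scores wa wb x = true := by simp [goodB, hdom, hS]
        rw [show loopA wa wb M rank (x :: rest)
              = loopA wa wb (max M (bv x)) (rank + 1) rest by simp [loopA, hB, hS]]
        rw [ih (C ++ [x]) (max M (bv x)) (rank + 1) hL' hub' hatt' hl0']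
        simp only [List.any_cons, helim, Bool.false_or, List.countP_cons, hgood]
        split
        · rfl
        · push_cast; ring
      · have hgood : goodB scores wa wb x = false := by simp [goodB, hS]
        rw [show loopA wa wb M rank (x :: rest)
              = loopA wa wb (max M (bv x)) rank rest by simp [loopA, hB, hS]]
        rw [ih (C ++ [x]) (max M (bv x)) rank hL' hub' hatt' hl0']
        simp [List.any_cons, helim, hgood]

-- ===== VERDICT (by name: the statement is the Claim_ definition above) =====
theorem solution_spec : Claim_equal_solution := by
  intro scores hdom hpre
  unfold Spec_solution
  obtain ⟨hne, hlen⟩ := hpre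
  cases scores with
  | nil => exact absurd rfl hne
  | cons w t =>
    obtain ⟨l0, L', hL0⟩ : ∃ l0 L', PySem.List.sorted (w :: t) keyA = l0 :: L' := by
      rcases h : PySem.List.sorted (w :: t) keyA with _ | ⟨a, b⟩
      · rw [PySem.List.sorted_eq_nil_iff] at h; cases h
      · exact ⟨a, b, rfl⟩
    have hperm : (PySem.List.sorted (w :: t) keyA).Perm (w :: t) := PySem.List.sorted_perm _ _ _
    have hpw : (PySem.List.sorted (w :: t) keyA).Pairwise relS := by
      refine (PySem.List.sorted_pairwise (w :: t) keyA).imp ?_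
      intro a b h
      unfold relS
      rcases Prod.Lex.le_iff.mp h with h1 | ⟨h1, h2⟩
      · exact Or.inl (by simp [keyA] at h1; omega)
      · exact Or.inr ⟨by simp [keyA] at h1; omega, by simpa [keyA] using h2⟩
    have hA : solution (w :: t)
        = loopA (av w) (bv w) (bv l0) 1 (l0 :: L') := by
      show (match PySem.List.sorted (w :: t) keyA with
            | [] => (0 : Int)
            | s0 :: srest => loopA (av w) (bv w) (bv s0) 1 (s0 :: srest)) = _
      rw [hL0]
    have hmain := loopA_eq (w :: t) (PySem.List.sorted (w :: t) keyA) l0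
        (av w) (bv w) hperm hpw (by rw [hL0]; rfl)
        (PySem.List.sorted (w :: t) keyA) [] (bv l0) 1
        (by simp) (by simp) (Or.inl rfl) (Or.inl rfl)
    rw [hL0] at hmain
    have hany : (l0 :: L').any (elimEq (w :: t) (av w) (bv w))
        = dominatedBy (w :: t) (av w) (bv w) := by
      rw [Bool.eq_iff_iff]
      constructor
      · intro h
        obtain ⟨x, hx, hex⟩ := List.any_eq_true.mp h
        simp only [elimEq, Bool.and_eq_true, beq_iff_eq] at hex
        rw [← hex.1.2, ← hex.2]
        exact hex.1.1
      · intro h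
        refine List.any_eq_true.mpr ⟨w, ?_, ?_⟩
        · rw [← hL0]; exact hperm.mem_iff.mpr (by simp)
        · simp [elimEq, h]
    have hcnt : (l0 :: L').countP (goodB (w :: t) (av w) (bv w))
        = (w :: t).countP (goodB (w :: t) (av w) (bv w)) := by
      rw [← hL0]; exact hperm.countP_eq _
    have hAlt : solution_alt (w :: t)
        = if dominatedBy (w :: t) (av w) (bv w) then (-1 : Int)
          else 1 + ((w :: t).countP (goodB (w :: t) (av w) (bv w)) : Int) := by
      show (if dominatedBy (w :: t) (av w) (bv w) then (-1 : Int)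
            else (w :: t).foldl (fun rank e =>
              if goodB (w :: t) (av w) (bv w) e = true then rank + 1 else rank) 1) = _
      rw [foldl_count]
    rw [hA, hmain, hany, hcnt, hAlt]
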